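-- pv_equiv track=rewrite | github.com/overad/DataScience | src/algoritm/CRFMP.py | mergeCharsInOneWord
-- ===== SOURCE A (Python) =====
-- def mergeCharsInOneWord(charList, tagList):
--     wordList = []
--     word = ''
--     for i in range(len(charList)):
--         tag, char = tagList[i], charList[i]
--         if tag == 'E':
--             word += char
--             wordList.append(word)
--             word = ''
--         elif tag == "S":
--             word += char
--             wordList.append(word)
--             word = ''
--         else:
--             word += char
--     return wordList
-- ===== SOURCE B (Python) =====
-- def mergeCharsInOneWord(charList, tagList):
--     bounds = [i for i in range(len(charList)) if tagList[i] in ('E', 'S')]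
--     wordList = []
--     start = 0
--     for b in bounds:
--         wordList.append(''.join(charList[start:b + 1]))
--         start = b + 1
--     return wordList
-- ===== Notes on version B (the rewrite author's own statement) =====
-- stated objective: alternative
-- what changed: B first collects the boundary indices (tags 'E'/'S') in one scan and then builds each word by slicing charList between consecutive boundaries and joining, instead of A's single loop that threads a growing accumulator string and flushes it at each boundary.
import Mathlib
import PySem

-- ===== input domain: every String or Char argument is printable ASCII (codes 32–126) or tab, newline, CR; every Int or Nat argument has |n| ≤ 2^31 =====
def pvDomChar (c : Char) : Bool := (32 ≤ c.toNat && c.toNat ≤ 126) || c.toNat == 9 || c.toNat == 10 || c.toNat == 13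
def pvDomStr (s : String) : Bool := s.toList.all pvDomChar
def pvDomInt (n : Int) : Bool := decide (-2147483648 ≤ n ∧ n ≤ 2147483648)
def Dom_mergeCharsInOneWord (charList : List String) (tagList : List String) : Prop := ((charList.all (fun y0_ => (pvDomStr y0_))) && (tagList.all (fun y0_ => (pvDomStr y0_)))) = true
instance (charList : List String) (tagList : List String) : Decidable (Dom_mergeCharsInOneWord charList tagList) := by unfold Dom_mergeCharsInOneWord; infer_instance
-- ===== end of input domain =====

-- B rebuilds the words from boundary indices (one scan collecting indices tagged 'E'/'S', then slice-and-join
-- between consecutive boundaries) instead of A's accumulator-flushing loop; an alternative decomposition, same cost.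


-- ===== PORT A =====
-- A's loop body: tag, char = tagList[i], charList[i]; flush the accumulator on 'E'/'S', else extend it.
def pvStepA (charList tagList : List String) (st : List String × String) (i : Nat) : List String × String :=
  let tag := (PySem.List.pyGet? tagList (i : Int)).getD ""
  let ch := (PySem.List.pyGet? charList (i : Int)).getD ""
  if tag = "E" then (st.1 ++ [st.2 ++ ch], "")
  else if tag = "S" then (st.1 ++ [st.2 ++ ch], "")
  else (st.1, st.2 ++ ch)

def mergeCharsInOneWord (charList : List String) (tagList : List String) : List String :=
  ((List.range charList.length).foldl (pvStepA charList tagList) ([], "")).1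

-- ===== PORT B =====
-- Source B: tagList[i] in ('E','S')
def pvIsBound (tagList : List String) (i : Nat) : Bool :=
  let t := (PySem.List.pyGet? tagList (i : Int)).getD ""
  t == "E" || t == "S"

-- Source B loop body: append ''.join(charList[start:b+1]); start = b+1
def pvStepB (charList : List String) (st : List String × Nat) (b : Nat) : List String × Nat :=
  (st.1 ++ [String.join (PySem.List.slice charList (some (st.2 : Int)) (some ((b + 1 : Nat) : Int)))], b + 1)

def mergeCharsInOneWord_alt (charList : List String) (tagList : List String) : List String :=
  (((List.range charList.length).filter (pvIsBound tagList)).foldl (pvStepB charList) ([], 0)).1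

-- ===== PRECONDITION & SPEC =====
-- Pre_ excludes exactly the inputs where A raises IndexError (tagList shorter than charList); B raises there too.
def Pre_mergeCharsInOneWord (charList : List String) (tagList : List String) : Prop :=
  charList.length ≤ tagList.length
instance (charList : List String) (tagList : List String) : Decidable (Pre_mergeCharsInOneWord charList tagList) := by unfold Pre_mergeCharsInOneWord; infer_instance
def pvWitness_mergeCharsInOneWord : List String × List String := (["a", "b", "c"], ["B", "E", "S"])

def Spec_mergeCharsInOneWord (charList : List String) (tagList : List String) (out : List String) : Prop := out = mergeCharsInOneWord_alt charList tagList
instance (charList : List String) (tagList : List String) (out : List String) : Decidable (Spec_mergeCharsInOneWord charList tagList out) := by unfold Spec_mergeCharsInOneWord; infer_instance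

-- ===== CLAIM (what is proved, stated in full; the proofs are below) =====
def Claim_equal_mergeCharsInOneWord : Prop := ∀ (charList : List String) (tagList : List String), Dom_mergeCharsInOneWord charList tagList → Pre_mergeCharsInOneWord charList tagList → Spec_mergeCharsInOneWord charList tagList (mergeCharsInOneWord charList tagList)

-- ===== LEMMAS AND PROOFS =====

-- common reference: structural recursion on the two lists with the accumulated word
def mergeRef : List String → List String → List String → String → List String
  | [], _, ws, _ => ws
  | _ :: _, [], ws, _ => ws
  | c :: cs, t :: ts, ws, w =>
    if t = "E" ∨ t = "S" then mergeRef cs ts (ws ++ [w ++ c]) "" else mergeRef cs ts ws (w ++ c)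

theorem join_snoc (l : List String) (s : String) :
    String.join (l ++ [s]) = String.join l ++ s := by
  simp [String.join]

theorem A_loop (charList tagList : List String) (h : charList.length ≤ tagList.length) :
    ∀ (n k : Nat) (ws : List String) (w : String), k + n = charList.length →
    ((List.range' k n).foldl (pvStepA charList tagList) (ws, w)).1
      = mergeRef (charList.drop k) (tagList.drop k) ws w := by
  intro n
  induction n with
  | zero =>
    intro k ws w hk
    have : charList.drop k = [] := by
      apply List.drop_eq_nil_of_le; omega
    simp [this, mergeRef]
  | succ n ih =>
    intro k ws w hk
    have hkc : k < charList.length := by omega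
    have hkt : k < tagList.length := by omega
    rw [List.range'_succ, List.foldl_cons]
    rw [List.drop_eq_getElem_cons hkc, List.drop_eq_getElem_cons hkt]
    have hstep : pvStepA charList tagList (ws, w) k =
        (if tagList[k] = "E" ∨ tagList[k] = "S" then (ws ++ [w ++ charList[k]], "")
         else (ws, w ++ charList[k])) := by
      simp [pvStepA, List.getElem?_eq_getElem hkc, List.getElem?_eq_getElem hkt]
      split_ifs <;> simp_all
    rw [hstep]
    by_cases hb : tagList[k] = "E" ∨ tagList[k] = "S"
    · rw [if_pos hb, ih (k + 1) _ _ (by omega)]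
      simp [mergeRef, hb]
    · rw [if_neg hb, ih (k + 1) _ _ (by omega)]
      simp [mergeRef, hb]

theorem join_take_succ (charList : List String) (start k : Nat)
    (hsk : start ≤ k) (hk : k < charList.length) :
    String.join ((charList.drop start).take (k + 1 - start))
      = String.join ((charList.drop start).take (k - start)) ++ charList[k] := by
  have h1 : k + 1 - start = (k - start) + 1 := by omega
  have h2 : (charList.drop start)[k - start]? = some charList[k] := by
    rw [List.getElem?_drop]
    rw [List.getElem?_eq_getElem (by omega)]
    congr 1; congr 1; omega
  rw [h1, List.take_add_one, h2]
  simp [join_snoc]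

theorem B_loop (charList tagList : List String) (h : charList.length ≤ tagList.length) :
    ∀ (n k start : Nat) (ws : List String), start ≤ k → k + n = charList.length →
    (((List.range' k n).filter (pvIsBound tagList)).foldl (pvStepB charList) (ws, start)).1
      = mergeRef (charList.drop k) (tagList.drop k) ws
          (String.join ((charList.drop start).take (k - start))) := by
  intro n
  induction n with
  | zero =>
    intro k start ws hsk hk
    have : charList.drop k = [] := by
      apply List.drop_eq_nil_of_le; omega
    simp [this, mergeRef]
  | succ n ih =>
    intro k start ws hsk hk
    have hkc : k < charList.length := by omega
    have hkt : k < tagList.length := by omega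
    rw [List.range'_succ, List.filter_cons]
    rw [List.drop_eq_getElem_cons hkc, List.drop_eq_getElem_cons hkt]
    have hbnd : pvIsBound tagList k = decide (tagList[k] = "E" ∨ tagList[k] = "S") := by
      simp only [pvIsBound, PySem.List.pyGet?_natCast, List.getElem?_eq_getElem hkt, Option.getD_some]
      by_cases h1 : tagList[k] = "E" <;> by_cases h2 : tagList[k] = "S" <;> simp [h1, h2]
    by_cases hb : tagList[k] = "E" ∨ tagList[k] = "S"
    · rw [hbnd]
      simp only [hb, decide_true, if_pos, List.foldl_cons]
      have hstep : pvStepB charList (ws, start) k =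
          (ws ++ [String.join ((charList.drop start).take (k - start)) ++ charList[k]], k + 1) := by
        simp only [pvStepB]
        rw [PySem.List.slice_natCast]
        rw [join_take_succ charList start k hsk hkc]
      rw [hstep]
      rw [ih (k + 1) (k + 1) _ (le_refl _) (by omega)]
      simp [mergeRef, hb, String.join]
    · rw [hbnd]
      simp only [hb, decide_false, Bool.false_eq_true, if_neg, not_false_iff]
      rw [ih (k + 1) start _ (by omega) (by omega)]
      simp only [mergeRef, hb, ite_false]
      congr 1
      have : k + 1 - start = (k - start) + 1 := by omega
      rw [this, List.take_add_one]
      have h2 : (charList.drop start)[k - start]? = some charList[k] := by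
        rw [List.getElem?_drop, List.getElem?_eq_getElem (by omega)]
        congr 1; congr 1; omega
      rw [h2]; simp [join_snoc]

-- ===== VERDICT (by name: the statement is the Claim_ definition above) =====
theorem mergeCharsInOneWord_spec : Claim_equal_mergeCharsInOneWord := by
  intro charList tagList _ hpre
  unfold Spec_mergeCharsInOneWord mergeCharsInOneWord mergeCharsInOneWord_alt
  rw [List.range_eq_range']
  rw [A_loop charList tagList hpre charList.length 0 [] "" (by omega)]
  rw [B_loop charList tagList hpre charList.length 0 0 [] (le_refl _) (by omega)]
  simp [String.join]
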